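-- pv_equiv track=rewrite | github.com/Benu13/Praca_magisterska_Dokubot | Dokubot/LogicHandler.py | get_listed_combination
-- ===== SOURCE A (Python) =====
-- def get_listed_combination(form, logic, keys):
--     express = []
--     j = 0
--     place_after_par = False
--     for i in range(len(form) - 1):
--         if form[i] not in ['(', ')']:
--             express.append(keys[int(form[i])])
--         else:
--             express.append(form[i])
--
--         if place_after_par:
--             if form[i + 1] != ')':
--                 express.append(logic[j])
--                 place_after_par = False
--                 j += 1
--         if form[i] not in ['(', ')']:
--             if form[i + 1] != ')':
--                 express.append(logic[j])
--                 j += 1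
--             else:
--                 place_after_par = True
--
--     if form[-1] == ')':
--         express.append(form[-1])
--     else:
--         express.append(keys[int(form[-1])])
--     return ['('] + express + [')']
-- ===== SOURCE B (Python) =====
-- def get_listed_combination(form, logic, keys):
--     # staged, declarative rebuild: map tokens; compute last non-')' token per prefix;
--     # list the operator slots; pair slots with operators in a dict; assemble.
--     mapped = [t if t in ('(', ')') else keys[int(t)] for t in form]
--     lasts, prev = [], None
--     for t in form:
--         if t != ')':
--             prev = t
--         lasts.append(prev)
--     slots = [i for (i, last), nxt in zip(enumerate(lasts), form[1:])
--              if nxt != ')' and last not in (None, '(')]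
--     op_at = dict(zip(slots, logic))
--     out = ['(']
--     for i, m in enumerate(mapped):
--         out.append(m)
--         if i in op_at:
--             out.append(op_at[i])
--     out.append(')')
--     return out
-- ===== Notes on version B (the rewrite author's own statement) =====
-- stated objective: alternative
-- what changed: Replaces A's single-pass state machine (deferred place_after_par flag, running operator counter, dual insertion branches) with a staged declarative rebuild: map all tokens, compute the per-prefix last non-')' token, list the operator-slot positions, pair slots with operators via dict(zip(slots, logic)), then assemble the output by dictionary lookup per position.
import Mathlib
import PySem

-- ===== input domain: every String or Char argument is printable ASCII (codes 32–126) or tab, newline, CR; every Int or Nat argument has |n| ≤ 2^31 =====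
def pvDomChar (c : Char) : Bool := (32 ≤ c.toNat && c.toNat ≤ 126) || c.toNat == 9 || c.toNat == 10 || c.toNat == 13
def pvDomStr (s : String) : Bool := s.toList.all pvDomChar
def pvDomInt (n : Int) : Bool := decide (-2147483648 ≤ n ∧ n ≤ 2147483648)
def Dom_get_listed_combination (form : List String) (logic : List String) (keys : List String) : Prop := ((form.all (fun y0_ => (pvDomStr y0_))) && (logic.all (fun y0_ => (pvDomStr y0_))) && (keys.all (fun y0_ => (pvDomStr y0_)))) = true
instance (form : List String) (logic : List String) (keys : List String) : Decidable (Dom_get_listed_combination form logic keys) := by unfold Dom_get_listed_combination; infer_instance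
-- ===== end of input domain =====

-- B rebuilds the expression in declarative stages (map every token, compute the per-prefix last
-- non-')' token, list the operator-slot positions, pair slots with operators in a dict, assemble)
-- instead of A's online state machine with a deferred flag (objective: alternative).

-- logic[j]  (default "" is unreachable under Pre_: Python raises IndexError there)
def pvLogicAt (logic : List String) (j : Int) : String := (PySem.List.pyGet? logic j).getD ""
-- keys[int(t)]  (defaults unreachable under Pre_: Python raises ValueError/IndexError there)
def pvKeyAt (keys : List String) (t : String) : String :=
  (PySem.List.pyGet? keys ((PySem.Int.ofStr? t).getD 0)).getD ""

-- ===== PORT A =====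
-- the for-loop over i in range(len(form)-1), reading form[i] (= t) and form[i+1] (= next)
def aLoop (logic keys : List String) (form : List String) (express : List String) (j : Int)
    (pap : Bool) : List String × Int × Bool :=
  match form with
  | t :: next :: rest =>
    let express := express ++ [if t = "(" ∨ t = ")" then t else pvKeyAt keys t]
    let s1 : List String × Int × Bool :=
      if pap = true ∧ next ≠ ")" then (express ++ [pvLogicAt logic j], j + 1, false)
      else (express, j, pap)
    let s2 : List String × Int × Bool :=
      if ¬ (t = "(" ∨ t = ")") then
        if next ≠ ")" then (s1.1 ++ [pvLogicAt logic s1.2.1], s1.2.1 + 1, s1.2.2)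
        else (s1.1, s1.2.1, true)
      else s1
    aLoop logic keys (next :: rest) s2.1 s2.2.1 s2.2.2
  | _ => (express, j, pap)

def get_listed_combination (form : List String) (logic : List String) (keys : List String) : List String :=
  let st := aLoop logic keys form [] 0 false
  let last := (PySem.List.pyGet? form (-1)).getD ""
  let express := st.1 ++ [if last = ")" then last else pvKeyAt keys last]
  "(" :: express ++ [")"]

-- ===== PORT B =====
-- Source B's second pass: the running "last token that is not ')'" per position (None = none yet)
def bLasts : List String → Option String → List (Option String)
  | [], _ => []
  | t :: r, prev =>
    let p := if t = ")" then prev else some t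
    p :: bLasts r p

def get_listed_combination_alt (form : List String) (logic : List String) (keys : List String) : List String :=
  let mapped := form.map (fun t => if t = "(" ∨ t = ")" then t else pvKeyAt keys t)
  let lasts := bLasts form none
  let slots := (((PySem.List.enumerate lasts 0).zip (form.drop 1)).filter
      (fun p => !(p.2 == ")") && !(p.1.2 == (none : Option String)) && !(p.1.2 == some "("))).map (·.1.1)
  let opAt : PySem.Dict Int String := PySem.Dict.ofList (slots.zip logic)
  let out := (PySem.List.enumerate mapped 0).foldl (fun out p =>
      let out := out ++ [p.2]
      if opAt.contains p.1 then out ++ [opAt.getD p.1 ""] else out) ["("]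
  out ++ [")"]

-- ===== PRECONDITION & SPEC =====
-- is this (the last non-')' token of some prefix) a key?  none = no such token, never some ")"
def pvIsKey (o : Option String) : Bool :=
  match o with
  | some t => !(t == "(") && !(t == ")")
  | none => false

-- the last non-')' token of form[:k+1], falling back to prev when that prefix is all ')'
def pvLastNP (form : List String) (prev : Option String) (k : Int) : Option String :=
  match ((form.take (k + 1).toNat).reverse.dropWhile (fun t => t == ")")).head? with
  | some x => some x
  | none => prev

-- position k needs a logic operator: form[k+1] ≠ ')' and the prefix up to k ends (after ')'s) in a key
def pvSlotP (form : List String) (prev : Option String) (k : Int) : Bool :=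
  !(PySem.List.pyGetD form (k + 1) "" == ")") && pvIsKey (pvLastNP form prev k)

-- exactly where Python A returns: form nonempty (else form[-1] raises IndexError), every
-- non-paren token an int-string validly indexing keys (else ValueError/IndexError), the last
-- token not '(' (else keys[int('(')] raises ValueError), and logic long enough for every
-- operator slot (else logic[j] raises IndexError)
def Pre_get_listed_combination (form : List String) (logic : List String) (keys : List String) : Prop :=
  form ≠ [] ∧
  (∀ t ∈ form, t = "(" ∨ t = ")" ∨
      ((PySem.Int.ofStr? t).isSome ∧
       (PySem.List.pyGet? keys ((PySem.Int.ofStr? t).getD 0)).isSome)) ∧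
  form.getLast? ≠ some "(" ∧
  (PySem.List.pyRange 0 ((form.length : Int) - 1) 1).countP (pvSlotP form none) ≤ logic.length

instance (form : List String) (logic : List String) (keys : List String) :
    Decidable (Pre_get_listed_combination form logic keys) := by
  unfold Pre_get_listed_combination; infer_instance

def pvWitness_get_listed_combination : List String × List String × List String :=
  (["0", "1"], ["and"], ["a", "b"])

def Spec_get_listed_combination (form : List String) (logic : List String) (keys : List String) (out : List String) : Prop := out = get_listed_combination_alt form logic keys
instance (form : List String) (logic : List String) (keys : List String) (out : List String) : Decidable (Spec_get_listed_combination form logic keys out) := by unfold Spec_get_listed_combination; infer_instance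

-- ===== CLAIM (what is proved, stated in full; the proofs are below) =====
def Claim_equal_get_listed_combination : Prop := ∀ (form : List String) (logic : List String) (keys : List String), Dom_get_listed_combination form logic keys → Pre_get_listed_combination form logic keys → Spec_get_listed_combination form logic keys (get_listed_combination form logic keys)

-- ===== LEMMAS AND PROOFS =====

-- the mapped token at one position (B's `mapped` entry / A's per-token append)
def mapTok (keys : List String) (t : String) : String :=
  if t = "(" ∨ t = ")" then t else pvKeyAt keys t

-- reference: the interleaved core (positions 0..n-2), carrying the last non-')' token and the operator index
def core (logic keys : List String) : List String → Option String → Int → List String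
  | t :: next :: rest, prev, j =>
    let prev' := if t = ")" then prev else some t
    if pvIsKey prev' && !(next == ")") then
      mapTok keys t :: pvLogicAt logic j :: core logic keys (next :: rest) prev' (j + 1)
    else
      mapTok keys t :: core logic keys (next :: rest) prev' j
  | _, _, _ => []

-- reference: the absolute positions of the operator slots
def slotIdx : List String → Option String → Int → List Int
  | t :: next :: rest, prev, s =>
    let prev' := if t = ")" then prev else some t
    if pvIsKey prev' && !(next == ")") then s :: slotIdx (next :: rest) prev' (s + 1)
    else slotIdx (next :: rest) prev' (s + 1)
  | _, _, _ => []

theorem slotIdx_lb : ∀ (form : List String) (prev : Option String) (s : Int),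
    ∀ x ∈ slotIdx form prev s, s ≤ x := by
  intro form
  induction form with
  | nil => intro prev s x hx; simp [slotIdx] at hx
  | cons t tl ih =>
    intro prev s x hx
    cases tl with
    | nil => simp [slotIdx] at hx
    | cons next rest =>
      simp only [slotIdx] at hx
      by_cases hc : (pvIsKey (if t = ")" then prev else some t) && !(next == ")")) = true
      · rw [if_pos hc] at hx
        rcases List.mem_cons.mp hx with h | h
        · omega
        · have := ih _ _ _ h; omega
      · rw [if_neg hc] at hx
        have := ih _ _ _ hx; omega

theorem slotIdx_pairwise : ∀ (form : List String) (prev : Option String) (s : Int),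
    (slotIdx form prev s).Pairwise (· < ·) := by
  intro form
  induction form with
  | nil => intro prev s; simp [slotIdx]
  | cons t tl ih =>
    intro prev s
    cases tl with
    | nil => simp [slotIdx]
    | cons next rest =>
      simp only [slotIdx]
      by_cases hc : (pvIsKey (if t = ")" then prev else some t) && !(next == ")")) = true
      · rw [if_pos hc]
        exact List.Pairwise.cons (fun x hx => by have := slotIdx_lb _ _ _ x hx; omega) (ih _ _)
      · rw [if_neg hc]; exact ih _ _

-- ---- A's loop, characterised against `core` (the flag is "previous term still open across ')'s") ----

theorem step_open (logic keys : List String) (next : String) (rest express : List String) (j : Int) :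
    aLoop logic keys ("(" :: next :: rest) express j false
      = aLoop logic keys (next :: rest) (express ++ ["("]) j false := by
  simp [aLoop]

theorem step_close (logic keys : List String) (next : String) (rest express : List String) (j : Int) :
    aLoop logic keys (")" :: next :: rest) express j false
      = aLoop logic keys (next :: rest) (express ++ [")"]) j false := by
  simp [aLoop]

theorem step_close_flag_keep (logic keys : List String) (rest express : List String) (j : Int) :
    aLoop logic keys (")" :: ")" :: rest) express j true
      = aLoop logic keys (")" :: rest) (express ++ [")"]) j true := by
  simp [aLoop]

theorem step_close_flag_fire (logic keys : List String) (next : String) (rest express : List String)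
    (j : Int) (hn : next ≠ ")") :
    aLoop logic keys (")" :: next :: rest) express j true
      = aLoop logic keys (next :: rest) (express ++ [")", pvLogicAt logic j]) (j + 1) false := by
  simp [aLoop, hn]

theorem step_key_op (logic keys : List String) (t next : String) (rest express : List String)
    (j : Int) (h1 : t ≠ "(") (h2 : t ≠ ")") (hn : next ≠ ")") :
    aLoop logic keys (t :: next :: rest) express j false
      = aLoop logic keys (next :: rest) (express ++ [pvKeyAt keys t, pvLogicAt logic j]) (j + 1) false := by
  simp [aLoop, h1, h2, hn]

theorem step_key_flag (logic keys : List String) (t : String) (rest express : List String)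
    (j : Int) (h1 : t ≠ "(") (h2 : t ≠ ")") :
    aLoop logic keys (t :: ")" :: rest) express j false
      = aLoop logic keys (")" :: rest) (express ++ [pvKeyAt keys t]) j true := by
  simp [aLoop, h1, h2]

theorem A_loop_eq (logic keys : List String) :
    ∀ (form express : List String) (j : Int) (prev : Option String),
      prev ≠ some ")" →
      (aLoop logic keys form express j
          (pvIsKey prev && (form.head?.getD "" == ")"))).1 =
        express ++ core logic keys form prev j := by
  intro form
  induction form with
  | nil => intro express j prev hprev; simp [aLoop, core]
  | cons t tl ih =>
    intro express j prev hprev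
    cases tl with
    | nil =>
      simp only [aLoop, core]
      simp
    | cons next rest =>
      by_cases ht1 : t = "("
      · subst ht1
        rw [show (pvIsKey prev && (("(" :: next :: rest).head?.getD "" == ")")) = false by simp]
        rw [step_open]
        have H := ih (express ++ ["("]) j (some "(") (by simp)
        rw [show (pvIsKey (some "(") && ((next :: rest).head?.getD "" == ")")) = false by
              simp [pvIsKey]] at H
        rw [H]
        simp [core, mapTok, pvIsKey]
      · by_cases ht2 : t = ")"
        · subst ht2
          by_cases hk : pvIsKey prev = true
          · by_cases hn : next = ")"
            · subst hn
              rw [show (pvIsKey prev && ((")" :: ")" :: rest).head?.getD "" == ")")) = true by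
                    simp [hk]]
              rw [step_close_flag_keep]
              have H := ih (express ++ [")"]) j prev hprev
              rw [show (pvIsKey prev && ((")" :: rest).head?.getD "" == ")")) = true by
                    simp [hk]] at H
              rw [H]
              simp [core, mapTok, hk]
            · rw [show (pvIsKey prev && ((")" :: next :: rest).head?.getD "" == ")")) = true by
                    simp [hk]]
              rw [step_close_flag_fire logic keys next rest express j hn]
              have H := ih (express ++ [")", pvLogicAt logic j]) (j + 1) prev hprev
              rw [show (pvIsKey prev && ((next :: rest).head?.getD "" == ")")) = false by
                    simp [hn]] at H
              rw [H]
              simp [core, mapTok, hk, hn]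
          · have hk' : pvIsKey prev = false := by cases h : pvIsKey prev <;> simp_all
            rw [show (pvIsKey prev && ((")" :: next :: rest).head?.getD "" == ")")) = false by
                  simp [hk']]
            rw [step_close]
            have H := ih (express ++ [")"]) j prev hprev
            rw [show (pvIsKey prev && ((next :: rest).head?.getD "" == ")")) = (pvIsKey prev && (next == ")")) by
                  simp] at H
            by_cases hn : next = ")"
            · rw [show (pvIsKey prev && (next == ")")) = false by simp [hk']] at H
              rw [H]; simp [core, mapTok, hk', hn]
            · rw [show (pvIsKey prev && (next == ")")) = false by simp [hk']] at H
              rw [H]; simp [core, mapTok, hk']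
        · rw [show (pvIsKey prev && ((t :: next :: rest).head?.getD "" == ")")) = false by
              simp [ht2]]
          by_cases hn : next = ")"
          · subst hn
            rw [step_key_flag logic keys t rest express j ht1 ht2]
            have H := ih (express ++ [pvKeyAt keys t]) j (some t) (by simp [ht2])
            rw [show (pvIsKey (some t) && ((")" :: rest).head?.getD "" == ")")) = true by
                  simp [pvIsKey, ht1, ht2]] at H
            rw [H]
            simp [core, mapTok, pvIsKey, ht1, ht2]
          · rw [step_key_op logic keys t next rest express j ht1 ht2 hn]
            have H := ih (express ++ [pvKeyAt keys t, pvLogicAt logic j]) (j + 1) (some t) (by simp [ht2])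
            rw [show (pvIsKey (some t) && ((next :: rest).head?.getD "" == ")")) = false by
                  simp [hn]] at H
            rw [H]
            simp [core, mapTok, pvIsKey, ht1, ht2, hn]

-- ---- B's slot list, characterised against `slotIdx` ----

theorem B_slots_eq :
    ∀ (form : List String) (prev : Option String) (s : Int), prev ≠ some ")" →
      ((((PySem.List.enumerate (bLasts form prev) s).zip (form.drop 1)).filter
          (fun p => !(p.2 == ")") && !(p.1.2 == (none : Option String)) && !(p.1.2 == some "("))).map (·.1.1))
        = slotIdx form prev s := by
  intro form
  induction form with
  | nil => intro prev s _; simp [bLasts, slotIdx]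
  | cons t tl ih =>
    intro prev s hprev
    have hp' : (if t = ")" then prev else some t) ≠ some ")" := by
      by_cases h : t = ")" <;> simp [h, hprev]
    cases tl with
    | nil => simp [bLasts, slotIdx, PySem.List.enumerate_cons]
    | cons next rest =>
      simp only [bLasts, slotIdx, PySem.List.enumerate_cons, List.drop,
        List.zip_cons_cons, List.filter]
      have hP : (!(next == ")") && !((if t = ")" then prev else some t) == (none : Option String))
            && !((if t = ")" then prev else some t) == some "("))
          = (pvIsKey (if t = ")" then prev else some t) && !(next == ")")) := by
        rcases h : (if t = ")" then prev else some t) with _ | x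
        · simp [pvIsKey]
        · have hx : x ≠ ")" := by intro hh; exact hp' (by rw [h, hh])
          simp [pvIsKey]
          cases hb : (x == "(") <;> cases hn : (next == ")") <;> simp_all
      rw [hP]
      have IH := ih (if t = ")" then prev else some t) (s + 1) hp'
      simp only [List.drop_one, List.tail_cons, bLasts, PySem.List.enumerate_cons] at IH
      by_cases hc : (pvIsKey (if t = ")" then prev else some t) && !(next == ")")) = true
      · simp only [hc, if_true, List.map]
        rw [IH]
      · have hc' : (pvIsKey (if t = ")" then prev else some t) && !(next == ")")) = false := by
          cases h : (pvIsKey (if t = ")" then prev else some t) && !(next == ")")) <;> simp_all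
        simp only [hc', if_false, Bool.false_eq_true]
        rw [IH]

-- ---- the slot count, characterised against Pre_'s closed-form predicate ----

theorem pyGetD_cons_succ (x : String) (l : List String) (k : Int) (hk : 0 ≤ k) (d : String) :
    PySem.List.pyGetD (x :: l) (k + 1) d = PySem.List.pyGetD l k d := by
  unfold PySem.List.pyGetD PySem.List.pyGet? PySem.List.pyIdx?
  simp only [List.length_cons]
  split_ifs <;>
    first
      | omega
      | rfl
      | (have h : (k + 1).toNat = k.toNat + 1 := by omega
         simp [h])

theorem pvLastNP_cons_succ (t : String) (l : List String) (prev : Option String) (k : Int)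
    (hk : 0 ≤ k) :
    pvLastNP (t :: l) prev (k + 1) = pvLastNP l (if t = ")" then prev else some t) k := by
  have htake : (t :: l).take ((k + 1) + 1).toNat = t :: l.take (k + 1).toNat := by
    have : ((k + 1) + 1).toNat = (k + 1).toNat + 1 := by omega
    rw [this, List.take_succ_cons]
  unfold pvLastNP
  rw [htake, List.reverse_cons, List.dropWhile_append]
  cases he : ((l.take (k + 1).toNat).reverse.dropWhile (fun t => t == ")")).isEmpty
  · simp only [Bool.false_eq_true, if_false]
    rcases hh : (l.take (k + 1).toNat).reverse.dropWhile (fun t => t == ")") with _ | ⟨x, xs⟩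
    · simp [hh] at he
    · simp
  · have hnil := List.isEmpty_iff.mp he
    simp only [if_true]
    rw [hnil]
    by_cases ht : t = ")"
    · simp [ht]
    · have hb : (t == ")") = false := beq_eq_false_iff_ne.mpr ht
      simp [hb]
      intro h; exact absurd h ht

theorem pvSlotP_cons_succ (t : String) (l : List String) (prev : Option String) (k : Int)
    (hk : 0 ≤ k) :
    pvSlotP (t :: l) prev (k + 1) = pvSlotP l (if t = ")" then prev else some t) k := by
  unfold pvSlotP
  rw [pyGetD_cons_succ t l (k + 1) (by omega), pvLastNP_cons_succ t l prev k hk]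

theorem pyGetD_zero_cons (x : String) (l : List String) (d : String) :
    PySem.List.pyGetD (x :: l) 0 d = x := by
  unfold PySem.List.pyGetD PySem.List.pyGet? PySem.List.pyIdx?
  simp

theorem pvSlotP_zero (t : String) (l : List String) (prev : Option String) :
    pvSlotP (t :: l) prev 0
      = (!(PySem.List.pyGetD l 0 "" == ")") && pvIsKey (if t = ")" then prev else some t)) := by
  unfold pvSlotP pvLastNP
  rw [pyGetD_cons_succ t l 0 (le_refl 0)]
  by_cases ht : t = ")"
  · simp [ht, List.dropWhile]
  · have hb : (t == ")") = false := beq_eq_false_iff_ne.mpr ht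
    simp [ht, hb]

theorem slotIdx_count :
    ∀ (form : List String) (prev : Option String) (s : Int),
      slotIdx form prev s =
        (PySem.List.pyRange s (s + form.length - 1) 1).filter (fun i => pvSlotP form prev (i - s)) := by
  intro form
  induction form with
  | nil =>
    intro prev s
    rw [PySem.List.pyRange_one_eq_nil (by simp)]
    simp [slotIdx]
  | cons t tl ih =>
    intro prev s
    cases tl with
    | nil =>
      rw [PySem.List.pyRange_one_eq_nil (by simp)]
      simp [slotIdx]
    | cons next rest =>
      have hb : s < s + (t :: next :: rest).length - 1 := by simp; omega
      rw [PySem.List.pyRange_one_cons hb, List.filter_cons]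
      have h0 : pvSlotP (t :: next :: rest) prev (s - s)
          = (pvIsKey (if t = ")" then prev else some t) && !(next == ")")) := by
        rw [show s - s = (0 : Int) by ring, pvSlotP_zero, pyGetD_zero_cons, Bool.and_comm]
      have htail : (PySem.List.pyRange (s + 1) (s + (t :: next :: rest).length - 1) 1).filter
            (fun i => pvSlotP (t :: next :: rest) prev (i - s))
          = slotIdx (next :: rest) (if t = ")" then prev else some t) (s + 1) := by
        rw [ih (if t = ")" then prev else some t) (s + 1)]
        have hbnd : s + (t :: next :: rest).length - 1 = (s + 1) + (next :: rest).length - 1 := by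
          simp; omega
        rw [hbnd]
        apply List.filter_congr
        intro i hi
        have hmem := (PySem.List.mem_pyRange_one (a := s + 1)
          (b := (s + 1) + ((next :: rest).length : Int) - 1) (x := i)).mp hi
        have hk : 0 ≤ i - s - 1 := by omega
        rw [show i - s = (i - s - 1) + 1 by ring,
          pvSlotP_cons_succ t (next :: rest) prev (i - s - 1) hk]
        rw [show i - s - 1 = i - (s + 1) by ring]
      simp only [slotIdx]
      rw [h0, htail]

-- ---- looking up the slot→operator dict ----

theorem dict_items_ofList (l : List (Int × String)) (hnd : (l.map Prod.fst).Nodup) :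
    (PySem.Dict.ofList l).items = l := by
  unfold PySem.Dict.ofList
  have h := PySem.Dict.items_foldl_insert_fresh (l := l) (k := Prod.fst) (v := Prod.snd)
    (d := PySem.Dict.empty) (by intro a _; simp [pysem]) hnd
  simpa using h

theorem dict_get?_of_rank (slots : List Int) (logic : List String)
    (hnd : slots.Nodup) (hlen : slots.length ≤ logic.length)
    (k : Nat) (hk : k < slots.length) :
    (PySem.Dict.ofList (slots.zip logic)).get? slots[k] = some (logic[k]'(by omega)) := by
  have hfst : (slots.zip logic).map Prod.fst = slots := List.map_fst_zip hlen
  have hitems := dict_items_ofList (slots.zip logic) (by rw [hfst]; exact hnd)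
  apply PySem.Dict.get?_of_mem_items
  · rw [hitems]
    have : (slots.zip logic)[k]'(by rw [List.length_zip]; omega) = (slots[k], logic[k]'(by omega)) := by
      simp
    rw [← this]
    exact List.getElem_mem _
  · show (_ : PySem.Dict Int String).keys.Nodup
    have : (PySem.Dict.ofList (slots.zip logic)).keys = slots := by
      show (PySem.Dict.ofList (slots.zip logic)).items.map Prod.fst = slots
      rw [hitems, hfst]
    rw [this]; exact hnd

theorem dict_get?_none (slots : List Int) (logic : List String)
    (hnd : slots.Nodup) (hlen : slots.length ≤ logic.length)
    (i : Int) (hi : i ∉ slots) :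
    (PySem.Dict.ofList (slots.zip logic)).get? i = none := by
  have hfst : (slots.zip logic).map Prod.fst = slots := List.map_fst_zip hlen
  have hitems := dict_items_ofList (slots.zip logic) (by rw [hfst]; exact hnd)
  rw [PySem.Dict.get?_eq_none_iff_not_mem_keys]
  show i ∉ (PySem.Dict.ofList (slots.zip logic)).items.map Prod.fst
  rw [hitems, hfst]
  exact hi

-- ---- B's assembly pass, characterised against `core` ----

theorem B_assemble (logic keys : List String) :
    ∀ (form : List String) (prev : Option String) (j s : Int) (G : Int → Option String),
      prev ≠ some ")" →
      (∀ (k : Nat) (hk : k < (slotIdx form prev s).length),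
          G ((slotIdx form prev s)[k]) = some (pvLogicAt logic (j + k))) →
      (∀ i : Int, s ≤ i → i ∉ slotIdx form prev s → G i = none) →
      (PySem.List.enumerate (form.map (mapTok keys)) s).flatMap (fun p => p.2 :: (G p.1).toList)
        = core logic keys form prev j ++ (form.map (mapTok keys)).getLast?.toList := by
  intro form
  induction form with
  | nil => intro prev j s G hprev h1 h2; simp [core, PySem.List.enumerate_nil]
  | cons t tl ih =>
    intro prev j s G hprev h1 h2
    cases tl with
    | nil =>
      have hG : G s = none := h2 s (le_refl s) (by simp [slotIdx])
      simp [core, PySem.List.enumerate_cons, PySem.List.enumerate_nil, hG]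
    | cons next rest =>
      have hp' : (if t = ")" then prev else some t) ≠ some ")" := by
        by_cases h : t = ")" <;> simp [h, hprev]
      rw [List.map_cons, PySem.List.enumerate_cons, List.flatMap_cons]
      by_cases hc : (pvIsKey (if t = ")" then prev else some t) && !(next == ")")) = true
      · have hsl : slotIdx (t :: next :: rest) prev s
            = s :: slotIdx (next :: rest) (if t = ")" then prev else some t) (s + 1) := by
          simp only [slotIdx, hc, if_true]
        have hGs : G s = some (pvLogicAt logic j) := by
          have := h1 0 (by rw [hsl]; simp)
          simp only [hsl, List.getElem_cons_zero] at this
          simpa using this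
        have IH := ih (if t = ")" then prev else some t) (j + 1) (s + 1) G hp'
          (by
            intro k hk
            have hk' : k + 1 < (slotIdx (t :: next :: rest) prev s).length := by
              rw [hsl]; simpa using Nat.succ_lt_succ hk
            have := h1 (k + 1) hk'
            simp only [hsl, List.getElem_cons_succ] at this
            rw [this, show j + ((k + 1 : Nat) : Int) = j + 1 + (k : Int) by push_cast; omega])
          (by
            intro i hi hni
            apply h2 i (by omega)
            rw [hsl]
            intro hmem
            rcases List.mem_cons.mp hmem with h | h
            · omega
            · exact hni h)
        rw [IH]
        simp only [core, hc, if_true, hGs]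
        simp [List.getLast?_cons_cons]
      · have hc' : (pvIsKey (if t = ")" then prev else some t) && !(next == ")")) = false := by
          cases h : (pvIsKey (if t = ")" then prev else some t) && !(next == ")")) <;> simp_all
        have hsl : slotIdx (t :: next :: rest) prev s
            = slotIdx (next :: rest) (if t = ")" then prev else some t) (s + 1) := by
          simp only [slotIdx, hc', if_false, Bool.false_eq_true]
        have hGs : G s = none := by
          apply h2 s (le_refl s)
          rw [hsl]
          intro hmem
          have := slotIdx_lb _ _ _ s hmem
          omega
        have IH := ih (if t = ")" then prev else some t) j (s + 1) G hp'
          (by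
            intro k hk
            have hk' : k < (slotIdx (t :: next :: rest) prev s).length := by
              rw [hsl]; exact hk
            have := h1 k hk'
            simp only [hsl] at this
            exact this)
          (by intro i hi hni; exact h2 i (by omega) (by rw [hsl]; exact hni))
        rw [IH]
        simp only [core, hc', if_false, Bool.false_eq_true, hGs]
        simp [List.getLast?_cons_cons]

-- ===== VERDICT (by name: the statement is the Claim_ definition above) =====
theorem get_listed_combination_spec : Claim_equal_get_listed_combination := by
  intro form logic keys _ hpre
  obtain ⟨hne, _, hlast, hcnt⟩ := hpre
  unfold Spec_get_listed_combination get_listed_combination get_listed_combination_alt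
  dsimp only
  have hmapTok : (fun t => if t = "(" ∨ t = ")" then t else pvKeyAt keys t) = mapTok keys := rfl
  rw [hmapTok]
  rw [B_slots_eq form none 0 (by simp)]
  have hpw := slotIdx_pairwise form none 0
  have hnd : (slotIdx form none 0).Nodup := hpw.imp (fun h => ne_of_lt h)
  have hlen : (slotIdx form none 0).length ≤ logic.length := by
    rw [slotIdx_count form none 0]
    simp only [zero_add, sub_zero]
    rw [← List.countP_eq_length_filter]
    exact hcnt
  have hstep : (fun (out : List String) (p : Int × String) =>
        let out := out ++ [p.2]
        if (PySem.Dict.ofList ((slotIdx form none 0).zip logic)).contains p.1 then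
          out ++ [(PySem.Dict.ofList ((slotIdx form none 0).zip logic)).getD p.1 ""] else out)
      = (fun out p => out ++ (p.2 ::
          ((PySem.Dict.ofList ((slotIdx form none 0).zip logic)).get? p.1).toList)) := by
    funext out p
    rw [PySem.Dict.contains_eq_isSome_get?, PySem.Dict.getD_eq_get?_getD]
    cases h : (PySem.Dict.ofList ((slotIdx form none 0).zip logic)).get? p.1 <;> simp
  rw [hstep, PySem.List.foldl_append_eq_flatMap]
  rw [B_assemble logic keys form none 0 0
      (fun i => (PySem.Dict.ofList ((slotIdx form none 0).zip logic)).get? i) (by simp)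
      (by
        intro k hk
        show (PySem.Dict.ofList ((slotIdx form none 0).zip logic)).get? ((slotIdx form none 0)[k])
          = some (pvLogicAt logic (0 + (k : Int)))
        rw [dict_get?_of_rank (slotIdx form none 0) logic hnd hlen k hk]
        rw [show (0 : Int) + (k : Int) = (k : Int) by ring]
        rw [pvLogicAt, PySem.List.pyGet?_ofNat logic k (by omega)]
        rfl)
      (by
        intro i _ hni
        show (PySem.Dict.ofList ((slotIdx form none 0).zip logic)).get? i = none
        exact dict_get?_none (slotIdx form none 0) logic hnd hlen i hni)]
  have HA := A_loop_eq logic keys form [] 0 none (by simp)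
  rw [show (pvIsKey none && (form.head?.getD "" == ")")) = false by simp [pvIsKey]] at HA
  rw [HA]
  obtain ⟨l, hl⟩ : ∃ l, form.getLast? = some l := by
    cases h : form.getLast? with
    | none => exact absurd (List.getLast?_eq_none_iff.mp h) hne
    | some l => exact ⟨l, rfl⟩
  have hml : (form.map (mapTok keys)).getLast? = some (mapTok keys l) := by
    rw [List.getLast?_map, hl]; rfl
  have hlne : l ≠ "(" := by intro h; exact hlast (h ▸ hl)
  simp only [PySem.List.pyGet?_neg_one, hl, hml, Option.getD_some, Option.toList_some]
  by_cases h2 : l = ")"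
  · simp [h2, mapTok]
  · simp [h2, hlne, mapTok]
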